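-- pv_equiv track=rewrite | github.com/sandraschi/komga | rag/analysis/thematic_analyzer.py | _classify_theme_type
-- ===== SOURCE A (Python) =====
-- from enum import Enum
--
-- class ThemeType(str, Enum):
--     """Types of themes that can be identified."""
--     MAJOR = "major"
--     MINOR = "minor"
--     SYMBOLIC = "symbolic"
--     CHARACTER_DRIVEN = "character_driven"
--     PLOT_DRIVEN = "plot_driven"
--     SETTING_DRIVEN = "setting_driven"
--
-- def _classify_theme_type(theme_text: str) -> ThemeType:
--     """Classify the type of theme."""
--     words = theme_text.split()
--
--     # Check for character names or pronouns
--     if (any(word.istitle() for word in words) or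
--         any(word in ['he', 'she', 'they', 'him', 'her', 'them'] for word in words)):
--         return ThemeType.CHARACTER_DRIVEN
--
--     # Check for action verbs (plot-driven)
--     action_verbs = {'run', 'fight', 'discover', 'find', 'solve', 'escape', 'win', 'lose'}
--     if any(word in action_verbs for word in words):
--         return ThemeType.PLOT_DRIVEN
--
--     # Check for setting-related terms
--     setting_terms = {'city', 'house', 'forest', 'mountain', 'ocean', 'world', 'land', 'place'}
--     if any(word in setting_terms for word in words):
--         return ThemeType.SETTING_DRIVEN
--
--     # Check for abstract concepts (symbolic)
--     abstract_terms = {'love', 'death', 'time', 'freedom', 'justice', 'power', 'fear', 'hope'}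
--     if any(word in abstract_terms for word in words):
--         return ThemeType.SYMBOLIC
--
--     # Default to minor theme
--     return ThemeType.MINOR
-- ===== SOURCE B (Python) =====
-- from enum import Enum
--
-- class ThemeType(str, Enum):
--     """Types of themes that can be identified."""
--     MAJOR = "major"
--     MINOR = "minor"
--     SYMBOLIC = "symbolic"
--     CHARACTER_DRIVEN = "character_driven"
--     PLOT_DRIVEN = "plot_driven"
--     SETTING_DRIVEN = "setting_driven"
--
-- _PRONOUNS = {'he', 'she', 'they', 'him', 'her', 'them'}
-- _ACTION_VERBS = {'run', 'fight', 'discover', 'find', 'solve', 'escape', 'win', 'lose'}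
-- _SETTING_TERMS = {'city', 'house', 'forest', 'mountain', 'ocean', 'world', 'land', 'place'}
-- _ABSTRACT_TERMS = {'love', 'death', 'time', 'freedom', 'justice', 'power', 'fear', 'hope'}
--
-- def _classify_theme_type(theme_text: str) -> ThemeType:
--     """Classify the type of theme (single pass, then fixed priority)."""
--     found = set()
--     for word in theme_text.split():
--         if word.istitle() or word in _PRONOUNS:
--             found.add(ThemeType.CHARACTER_DRIVEN)
--         elif word in _ACTION_VERBS:
--             found.add(ThemeType.PLOT_DRIVEN)
--         elif word in _SETTING_TERMS:
--             found.add(ThemeType.SETTING_DRIVEN)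
--         elif word in _ABSTRACT_TERMS:
--             found.add(ThemeType.SYMBOLIC)
--     for t in (ThemeType.CHARACTER_DRIVEN, ThemeType.PLOT_DRIVEN,
--               ThemeType.SETTING_DRIVEN, ThemeType.SYMBOLIC):
--         if t in found:
--             return t
--     return ThemeType.MINOR
-- ===== Notes on version B (the rewrite author's own statement) =====
-- stated objective: alternative
-- what changed: Replaces A's four separate full scans of the word list (one any(...) per category) by a single pass that assigns each word its one category into a found set, followed by a fixed-priority lookup over the four categories.
import Mathlib
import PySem

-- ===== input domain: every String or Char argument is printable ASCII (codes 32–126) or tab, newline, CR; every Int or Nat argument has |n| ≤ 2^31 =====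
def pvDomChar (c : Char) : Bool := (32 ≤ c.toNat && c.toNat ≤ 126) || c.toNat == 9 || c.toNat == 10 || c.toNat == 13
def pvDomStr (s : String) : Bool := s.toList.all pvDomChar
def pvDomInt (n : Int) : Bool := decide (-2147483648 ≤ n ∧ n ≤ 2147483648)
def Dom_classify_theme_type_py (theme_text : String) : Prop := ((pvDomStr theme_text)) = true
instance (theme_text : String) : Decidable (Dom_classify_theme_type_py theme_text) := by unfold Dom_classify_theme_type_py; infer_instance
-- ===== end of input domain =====

-- B replaces A's four separate any(...) scans of the word list by a single pass that puts each
-- word's category into a found set and then picks by fixed priority (alternative decomposition).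


-- ===== PORT A =====
-- str.istitle, ported by hand (no PySem primitive); exact on ASCII strings: the only cased
-- ASCII characters are A-Z/a-z and there are no ASCII titlecase characters.
def istitleGo : Bool → Bool → List Char → Bool
  | _, found, [] => found
  | prevCased, found, c :: rest =>
    if PySem.Chars.isupper c then
      if prevCased then false else istitleGo true true rest
    else if PySem.Chars.islower c then
      if prevCased then istitleGo true true rest else false
    else istitleGo false found rest

def pyIstitle (w : String) : Bool := istitleGo false false w.toList

def actionVerbs : PySem.Set String :=
  PySem.Set.ofList ["run", "fight", "discover", "find", "solve", "escape", "win", "lose"]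
def settingTerms : PySem.Set String :=
  PySem.Set.ofList ["city", "house", "forest", "mountain", "ocean", "world", "land", "place"]
def abstractTerms : PySem.Set String :=
  PySem.Set.ofList ["love", "death", "time", "freedom", "justice", "power", "fear", "hope"]

def classify_theme_type_py (theme_text : String) : String :=
  let words := PySem.Str.split₀ theme_text
  if words.any (fun w => pyIstitle w) ||
     words.any (fun w => ["he", "she", "they", "him", "her", "them"].contains w) then
    "character_driven"
  else if words.any (fun w => actionVerbs.contains w) then
    "plot_driven"
  else if words.any (fun w => settingTerms.contains w) then
    "setting_driven"
  else if words.any (fun w => abstractTerms.contains w) then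
    "symbolic"
  else
    "minor"

-- ===== PORT B =====
def pronounSet : PySem.Set String :=
  PySem.Set.ofList ["he", "she", "they", "him", "her", "them"]

-- the character test of Source B's loop: word.istitle() or word in _PRONOUNS
def charP (w : String) : Bool := pyIstitle w || pronounSet.contains w

-- the body of Source B's single loop
def bStep (s : PySem.Set String) (w : String) : PySem.Set String :=
  if charP w then PySem.Set.add s "character_driven"
  else if actionVerbs.contains w then PySem.Set.add s "plot_driven"
  else if settingTerms.contains w then PySem.Set.add s "setting_driven"
  else if abstractTerms.contains w then PySem.Set.add s "symbolic"
  else s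

def classify_theme_type_py_alt (theme_text : String) : String :=
  let found := (PySem.Str.split₀ theme_text).foldl bStep PySem.Set.empty
  match ["character_driven", "plot_driven", "setting_driven", "symbolic"].find?
      (fun t => PySem.Set.contains found t) with
  | some t => t
  | none => "minor"

-- ===== PRECONDITION & SPEC =====
def Spec_classify_theme_type_py (theme_text : String) (out : String) : Prop := out = classify_theme_type_py_alt theme_text
instance (theme_text : String) (out : String) : Decidable (Spec_classify_theme_type_py theme_text out) := by unfold Spec_classify_theme_type_py; infer_instance

-- ===== CLAIM (what is proved, stated in full; the proofs are below) =====
def Claim_equal_classify_theme_type_py : Prop := ∀ (theme_text : String), Dom_classify_theme_type_py theme_text → Spec_classify_theme_type_py theme_text (classify_theme_type_py theme_text)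

-- ===== LEMMAS AND PROOFS =====

lemma any_or (ws : List String) (p q : String → Bool) :
    (ws.any p || ws.any q) = ws.any (fun w => p w || q w) := by
  induction ws with
  | nil => simp
  | cons a l ih => cases hp : p a <;> cases hq : q a <;> simp [List.any_cons, hp, hq, ← ih]

def catOf (w : String) : Option String :=
  if charP w then some "character_driven"
  else if actionVerbs.contains w then some "plot_driven"
  else if settingTerms.contains w then some "setting_driven"
  else if abstractTerms.contains w then some "symbolic"
  else none

lemma bStep_eq (s : PySem.Set String) (w : String) :
    bStep s w = match catOf w with | some c => PySem.Set.add s c | none => s := by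
  unfold bStep catOf
  split_ifs <;> rfl

lemma mem_bfold (ws : List String) (s : PySem.Set String) (c : String) :
    c ∈ ws.foldl bStep s ↔ c ∈ s ∨ ∃ w ∈ ws, catOf w = some c := by
  induction ws generalizing s with
  | nil => simp
  | cons a l ih =>
    rw [List.foldl_cons, ih, bStep_eq]
    cases h : catOf a with
    | none => simp [h]
    | some d =>
      simp only [List.exists_mem_cons_iff, h, Option.some.injEq, PySem.Set.mem_add]
      constructor
      · rintro ((hc | rfl) | hx)
        exacts [Or.inl hc, Or.inr (Or.inl rfl), Or.inr (Or.inr hx)]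
      · rintro (hc | rfl | hx)
        exacts [Or.inl (Or.inl hc), Or.inl (Or.inr rfl), Or.inr hx]

lemma mem_found (ws : List String) (c : String) :
    c ∈ ws.foldl bStep ([] : PySem.Set String) ↔ ∃ w ∈ ws, catOf w = some c := by
  rw [mem_bfold]; simp

lemma pron_eq (w : String) :
    (["he", "she", "they", "him", "her", "them"] : List String).contains w
      = pronounSet.contains w := rfl

lemma catOf_char {w : String} (h : charP w = true) :
    catOf w = some "character_driven" := by unfold catOf; rw [h]; simp

lemma catOf_plot {w : String} (h1 : charP w = false) (h2 : actionVerbs.contains w = true) :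
    catOf w = some "plot_driven" := by unfold catOf; rw [h1, h2]; simp

lemma catOf_setting {w : String} (h1 : charP w = false) (h2 : actionVerbs.contains w = false)
    (h3 : settingTerms.contains w = true) : catOf w = some "setting_driven" := by
  unfold catOf; rw [h1, h2, h3]; simp

lemma catOf_symbolic {w : String} (h1 : charP w = false) (h2 : actionVerbs.contains w = false)
    (h3 : settingTerms.contains w = false) (h4 : abstractTerms.contains w = true) :
    catOf w = some "symbolic" := by unfold catOf; rw [h1, h2, h3, h4]; simp

lemma char_inv {w : String} (h : catOf w = some "character_driven") : charP w = true := by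
  unfold catOf at h
  split_ifs at h with a b c d <;>
    first | exact a | exact b | exact c | exact d | simp at h

lemma plot_inv {w : String} (h : catOf w = some "plot_driven") :
    actionVerbs.contains w = true := by
  unfold catOf at h
  split_ifs at h with a b c d <;>
    first | exact a | exact b | exact c | exact d | simp at h

lemma setting_inv {w : String} (h : catOf w = some "setting_driven") :
    settingTerms.contains w = true := by
  unfold catOf at h
  split_ifs at h with a b c d <;>
    first | exact a | exact b | exact c | exact d | simp at h

lemma symbolic_inv {w : String} (h : catOf w = some "symbolic") :
    abstractTerms.contains w = true := by
  unfold catOf at h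
  split_ifs at h with a b c d <;>
    first | exact a | exact b | exact c | exact d | simp at h

theorem classify_theme_type_py_spec_aux (theme_text : String) :
    classify_theme_type_py theme_text = classify_theme_type_py_alt theme_text := by
  unfold classify_theme_type_py classify_theme_type_py_alt
  simp only []
  set ws := PySem.Str.split₀ theme_text with hws
  have hcomb : (ws.any (fun w => pyIstitle w) ||
      ws.any (fun w => (["he", "she", "they", "him", "her", "them"] : List String).contains w))
      = ws.any charP := by
    rw [any_or]; unfold charP; simp only [pron_eq]
  rw [hcomb]
  cases hA : ws.any charP with
  | true =>
    obtain ⟨w, hw, hcw⟩ := List.any_eq_true.mp hA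
    have h1 : "character_driven" ∈ ws.foldl bStep ([] : PySem.Set String) := by
      rw [mem_found]; exact ⟨w, hw, catOf_char hcw⟩
    simp [List.find?, PySem.Set.empty, h1]
  | false =>
    have hA' : ∀ w ∈ ws, charP w = false := by
      intro w hw
      by_contra h
      exact absurd hA (by simp [List.any_eq_true]; exact ⟨w, hw, by simpa using h⟩)
    have h1 : "character_driven" ∉ ws.foldl bStep ([] : PySem.Set String) := by
      rw [mem_found]
      rintro ⟨w, hw, hc⟩
      have hcc := char_inv hc
      rw [hA' w hw] at hcc
      exact Bool.false_ne_true hcc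
    cases hB : ws.any (fun w => actionVerbs.contains w) with
    | true =>
      obtain ⟨w, hw, hbw⟩ := List.any_eq_true.mp hB
      have h2 : "plot_driven" ∈ ws.foldl bStep ([] : PySem.Set String) := by
        rw [mem_found]; exact ⟨w, hw, catOf_plot (hA' w hw) hbw⟩
      simp [List.find?, PySem.Set.empty, h1, h2]
    | false =>
      have hB' : ∀ w ∈ ws, actionVerbs.contains w = false := by
        intro w hw
        by_contra h
        exact absurd hB (by simp [List.any_eq_true]; exact ⟨w, hw, by simpa using h⟩)
      have h2 : "plot_driven" ∉ ws.foldl bStep ([] : PySem.Set String) := by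
        rw [mem_found]
        rintro ⟨w, hw, hc⟩
        have hcc := plot_inv hc
        rw [hB' w hw] at hcc
        exact Bool.false_ne_true hcc
      cases hC : ws.any (fun w => settingTerms.contains w) with
      | true =>
        obtain ⟨w, hw, hcw⟩ := List.any_eq_true.mp hC
        have h3 : "setting_driven" ∈ ws.foldl bStep ([] : PySem.Set String) := by
          rw [mem_found]
          exact ⟨w, hw, catOf_setting (hA' w hw) (hB' w hw) hcw⟩
        simp [List.find?, PySem.Set.empty, h1, h2, h3]
      | false =>
        have hC' : ∀ w ∈ ws, settingTerms.contains w = false := by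
          intro w hw
          by_contra h
          exact absurd hC (by simp [List.any_eq_true]; exact ⟨w, hw, by simpa using h⟩)
        have h3 : "setting_driven" ∉ ws.foldl bStep ([] : PySem.Set String) := by
          rw [mem_found]
          rintro ⟨w, hw, hc⟩
          have hcc := setting_inv hc
          rw [hC' w hw] at hcc
          exact Bool.false_ne_true hcc
        cases hD : ws.any (fun w => abstractTerms.contains w) with
        | true =>
          obtain ⟨w, hw, hdw⟩ := List.any_eq_true.mp hD
          have h4 : "symbolic" ∈ ws.foldl bStep ([] : PySem.Set String) := by
            rw [mem_found]
            exact ⟨w, hw, catOf_symbolic (hA' w hw) (hB' w hw) (hC' w hw) hdw⟩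
          simp [List.find?, PySem.Set.empty, h1, h2, h3, h4]
        | false =>
          have hD' : ∀ w ∈ ws, abstractTerms.contains w = false := by
            intro w hw
            by_contra h
            exact absurd hD (by simp [List.any_eq_true]; exact ⟨w, hw, by simpa using h⟩)
          have h4 : "symbolic" ∉ ws.foldl bStep ([] : PySem.Set String) := by
            rw [mem_found]
            rintro ⟨w, hw, hc⟩
            have hcc := symbolic_inv hc
            rw [hD' w hw] at hcc
            exact Bool.false_ne_true hcc
          simp [List.find?, PySem.Set.empty, h1, h2, h3, h4]

-- ===== VERDICT (by name: the statement is the Claim_ definition above) =====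
theorem classify_theme_type_py_spec : Claim_equal_classify_theme_type_py := by
  intro t _
  exact classify_theme_type_py_spec_aux t
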